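-- pv_equiv track=rewrite | github.com/jonasvandervennet/adventofcode | 2019/08/part 1/main.py | to_layers
-- ===== SOURCE A (Python) =====
-- def to_layers(image: str, height: int, width: int):
--     layer_size = height * width
--     num_layers = int(len(image) / layer_size)
--     layers = []
--     for i in range(num_layers):
--         layer = []
--         for j in range(height):
--             layer.append([])
--             for k in range(width):
--                 layer[-1].append(int(image[i*layer_size+j*width+k]))
--         layers.append(layer)
--     return layers
-- ===== SOURCE B (Python) =====
-- def to_layers(image: str, height: int, width: int):
--     layer_size = height * width
--     num_layers = int(len(image) / layer_size)
--     consumed = image[:num_layers * layer_size] if num_layers > 0 else ""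
--     flat = [int(c) for c in consumed]
--     return [[flat[i * layer_size + j * width:i * layer_size + (j + 1) * width]
--              for j in range(height)]
--             for i in range(num_layers)]
-- ===== Notes on version B (the rewrite author's own statement) =====
-- stated objective: alternative
-- what changed: B converts the consumed prefix of the string to digits in one flat pass and then reshapes it by slicing (chunk per layer, slice per row), instead of A's three nested index loops appending one pixel at a time.
-- outside the precondition, e.g. on to_layers('abc123456', -2, -3): A returns [[]], B raises ValueError
import Mathlib
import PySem

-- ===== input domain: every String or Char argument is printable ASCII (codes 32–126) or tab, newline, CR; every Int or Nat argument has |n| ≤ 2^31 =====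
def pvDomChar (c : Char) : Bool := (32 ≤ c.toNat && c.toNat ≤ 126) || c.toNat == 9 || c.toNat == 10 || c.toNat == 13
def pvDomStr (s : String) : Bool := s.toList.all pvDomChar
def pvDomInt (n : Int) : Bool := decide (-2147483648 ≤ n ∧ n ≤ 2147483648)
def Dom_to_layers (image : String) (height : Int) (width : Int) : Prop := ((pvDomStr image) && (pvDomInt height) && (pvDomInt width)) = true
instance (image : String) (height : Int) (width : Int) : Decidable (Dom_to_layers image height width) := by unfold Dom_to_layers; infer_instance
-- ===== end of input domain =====

-- B converts the consumed prefix in one flat pass and reshapes it by slicing, instead of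
-- A's three nested index loops; same asymptotic cost (objective: alternative decomposition).

-- ===== PORT A =====
def to_layers (image : String) (height : Int) (width : Int) : List (List (List Int)) :=
  let layer_size := height * width
  let num_layers := PySem.Int.truncdiv (PySem.Str.len image) layer_size
  (PySem.List.pyRange 0 num_layers 1).foldl (fun layers i =>
    layers ++ [(PySem.List.pyRange 0 height 1).foldl (fun layer j =>
      layer ++ [(PySem.List.pyRange 0 width 1).foldl (fun row k =>
        row ++ [((PySem.Str.pyGet? image (i * layer_size + j * width + k)).bind
                  (fun c => PySem.Int.ofChars? [c])).getD 0]) []]) []]) []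

-- ===== PORT B =====
def to_layers_alt (image : String) (height : Int) (width : Int) : List (List (List Int)) :=
  let layer_size := height * width
  let num_layers := PySem.Int.truncdiv (PySem.Str.len image) layer_size
  let consumed := if 0 < num_layers then PySem.Str.slice image none (some (num_layers * layer_size)) else ""
  let flat := consumed.toList.map (fun c => (PySem.Int.ofChars? [c]).getD 0)
  (PySem.List.pyRange 0 num_layers 1).map (fun i =>
    (PySem.List.pyRange 0 height 1).map (fun j =>
      PySem.List.slice flat (some (i * layer_size + j * width)) (some (i * layer_size + (j + 1) * width))))

-- ===== PRECONDITION & SPEC =====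
-- Pre_ excludes the inputs on which Python raises: height*width = 0 (ZeroDivisionError) and a
-- non-digit character inside the consumed prefix (ValueError in A's digit loop when the loops
-- reach it; B converts the whole consumed prefix up front, so when height < 0 A returns layers
-- of empty rows without reading any character while B still raises — those inputs are excluded too).
def Pre_to_layers (image : String) (height : Int) (width : Int) : Prop :=
  height * width ≠ 0 ∧
  ((image.toList.take (max 0 (PySem.Int.truncdiv (PySem.Str.len image) (height * width) * (height * width))).toNat).all
    (fun c => 48 ≤ c.toNat && c.toNat ≤ 57)) = true
instance (image : String) (height : Int) (width : Int) : Decidable (Pre_to_layers image height width) := by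
  unfold Pre_to_layers; infer_instance

def pvWitness_to_layers : String × Int × Int := ("123456789012", 2, 3)

def Spec_to_layers (image : String) (height : Int) (width : Int) (out : List (List (List Int))) : Prop := out = to_layers_alt image height width
instance (image : String) (height : Int) (width : Int) (out : List (List (List Int))) : Decidable (Spec_to_layers image height width out) := by unfold Spec_to_layers; infer_instance

-- ===== CLAIM (what is proved, stated in full; the proofs are below) =====
def Claim_equal_to_layers : Prop := ∀ (image : String) (height : Int) (width : Int), Dom_to_layers image height width → Pre_to_layers image height width → Spec_to_layers image height width (to_layers image height width)

-- ===== LEMMAS AND PROOFS =====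

-- One row: A's innermost loop over k equals B's slice of the flat digit list.
lemma row_eq (image : String) (h w i j : Int)
    (hls : 0 < h * w)
    (hi0 : 0 ≤ i) (hi1 : i < PySem.Int.truncdiv (PySem.Str.len image) (h * w))
    (hj0 : 0 ≤ j) (hj1 : j < h) :
    (PySem.List.pyRange 0 w 1).map (fun k =>
        ((PySem.Str.pyGet? image (i * (h * w) + j * w + k)).bind
          (fun c => PySem.Int.ofChars? [c])).getD 0)
      =
    PySem.List.slice
      ((PySem.Str.slice image none
          (some (PySem.Int.truncdiv (PySem.Str.len image) (h * w) * (h * w)))).toList.map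
        (fun c => (PySem.Int.ofChars? [c]).getD 0))
      (some (i * (h * w) + j * w)) (some (i * (h * w) + (j + 1) * w)) := by
  have hh : 0 < h := lt_of_le_of_lt hj0 hj1
  have hw : 0 < w := by
    by_contra hwle
    have := mul_nonpos_of_nonneg_of_nonpos hh.le (not_lt.mp hwle)
    linarith
  have hlen0 : (0:Int) ≤ PySem.Str.len image := by
    rw [PySem.Str.len_eq]; exact_mod_cast Nat.zero_le _
  have htdiv : PySem.Int.truncdiv (PySem.Str.len image) (h * w)
      = PySem.Str.len image / (h * w) := by
    unfold PySem.Int.truncdiv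
    rw [Int.tdiv_eq_ediv]
    simp
  have hnl0 : 0 < PySem.Int.truncdiv (PySem.Str.len image) (h * w) :=
    lt_of_le_of_lt hi0 hi1
  have hub : PySem.Int.truncdiv (PySem.Str.len image) (h * w) * (h * w)
      ≤ PySem.Str.len image := by
    rw [htdiv]; exact Int.ediv_mul_le _ (ne_of_gt hls)
  have ha0 : 0 ≤ i * (h * w) + j * w :=
    add_nonneg (mul_nonneg hi0 hls.le) (mul_nonneg hj0 hw.le)
  have haw : i * (h * w) + j * w + w ≤ PySem.Int.truncdiv (PySem.Str.len image) (h * w) * (h * w) := by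
    nlinarith [mul_le_mul_of_nonneg_right (show j + 1 ≤ h by omega) hw.le,
      mul_le_mul_of_nonneg_right (show i + 1 ≤ PySem.Int.truncdiv (PySem.Str.len image) (h * w) by omega) hls.le]
  rw [show i * (h * w) + (j + 1) * w = (i * (h * w) + j * w) + w by ring]
  set a : Int := i * (h * w) + j * w with haeq
  set M : Int := PySem.Int.truncdiv (PySem.Str.len image) (h * w) * (h * w) with hMeq
  have hM0 : 0 ≤ M := le_trans ha0 (by linarith)
  have hub' : M.toNat ≤ image.toList.length := by
    rw [PySem.Str.len_eq] at hub
    exact Int.toNat_le.mpr (by simpa using hub)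
  rw [PySem.Str.toList_slice, PySem.Chars.slice_eq_listSlice, PySem.List.slice_to _ hM0]
  rw [PySem.List.slice_toNat _ ha0 (by linarith : (0:Int) ≤ a + w)]
  rw [PySem.List.pyRange_zero, List.map_map]
  have hlenflat : (List.map (fun c => (PySem.Int.ofChars? [c]).getD 0)
      (List.take M.toNat image.toList)).length = M.toNat := by
    simp only [List.length_map, List.length_take]
    omega
  apply List.ext_getElem
  · simp only [List.length_map, List.length_range, List.length_take, List.length_drop, hlenflat]
    omega
  · intro k hk1 hk2
    simp only [List.length_map, List.length_range] at hk1
    have hak : (a + (k:Int)).toNat = a.toNat + k := by omega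
    have hltM : a.toNat + k < M.toNat := by omega
    have hltL : a.toNat + k < image.toList.length := lt_of_lt_of_le hltM hub'
    simp only [List.getElem_map, List.getElem_range, Function.comp]
    rw [List.getElem_take, List.getElem_drop, List.getElem_map, List.getElem_take]
    have hget : PySem.List.pyGet? image.toList (a + (k:Int)) = some (image.toList[a.toNat + k]) := by
      rw [PySem.List.pyGet?_of_nonneg _ (by omega), hak]
      exact List.getElem?_eq_getElem hltL
    simp [PySem.Str.pyGet?, PySem.Chars.pyGet?_eq_listPyGet?, hget]

-- The two ports agree on every input (unconditionally on the Lean side).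
lemma ports_eq (image : String) (h w : Int) :
    to_layers image h w = to_layers_alt image h w := by
  unfold to_layers to_layers_alt
  simp only [PySem.List.foldl_append_singleton_eq_map, List.nil_append, List.map_inj_left,
    PySem.List.mem_pyRange_one, and_imp]
  intro i hi0 hi1 j hj0 hj1
  have hlen0 : (0:Int) ≤ PySem.Str.len image := by
    rw [PySem.Str.len_eq]; exact_mod_cast Nat.zero_le _
  have hnl0 : 0 < PySem.Int.truncdiv (PySem.Str.len image) (h * w) := lt_of_le_of_lt hi0 hi1
  have hls : 0 < h * w := by
    by_contra hle
    have : PySem.Int.truncdiv (PySem.Str.len image) (h * w) ≤ 0 :=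
      Int.tdiv_nonpos_of_nonneg_of_nonpos hlen0 (not_lt.mp hle)
    omega
  rw [if_pos hnl0]
  exact row_eq image h w i j hls hi0 hi1 hj0 hj1

-- ===== VERDICT (by name: the statement is the Claim_ definition above) =====
theorem to_layers_spec : Claim_equal_to_layers := by
  intro image h w _ _
  unfold Spec_to_layers
  exact ports_eq image h w
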